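-- pv_equiv track=rewrite | github.com/Dejon-js/athena-v2 | backend/modules/m8_vector/temporal_processor.py | get_content_freshness_distribution
-- ===== SOURCE A (Python) =====
-- from typing import Dict, List, Any, Optional
--
-- def get_content_freshness_distribution(search_results: List[Dict[str, Any]]) -> Dict[str, Any]:
--     """
--     Analyze the age distribution of search results.
--     """
--     age_ranges = {
--         'very_recent': 0,  # < 1 day
--         'recent': 0,       # 1-3 days
--         'this_week': 0,    # 4-7 days
--         'this_month': 0,   # 8-30 days
--         'older': 0         # > 30 days
--     }
--
--     for result in search_results:
--         age_days = result.get('age_days', 0)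
--
--         if age_days < 1:
--             age_ranges['very_recent'] += 1
--         elif age_days < 4:
--             age_ranges['recent'] += 1
--         elif age_days < 8:
--             age_ranges['this_week'] += 1
--         elif age_days < 31:
--             age_ranges['this_month'] += 1
--         else:
--             age_ranges['older'] += 1
--
--     return age_ranges
-- ===== SOURCE B (Python) =====
-- def get_content_freshness_distribution(search_results):
--     ages = [r.get('age_days', 0) for r in search_results]
--     # cumulative counts below each boundary; bucket sizes are their differences
--     c1 = sum(1 for a in ages if a < 1)
--     c4 = sum(1 for a in ages if a < 4)
--     c8 = sum(1 for a in ages if a < 8)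
--     c31 = sum(1 for a in ages if a < 31)
--     return {
--         'very_recent': c1,
--         'recent': c4 - c1,
--         'this_week': c8 - c4,
--         'this_month': c31 - c8,
--         'older': len(ages) - c31,
--     }
-- ===== Notes on version B (the rewrite author's own statement) =====
-- stated objective: alternative
-- what changed: Replaces the single-pass five-way if/elif classification that mutates a pre-built dict with staged passes: extract the ages once, compute four cumulative counts (ages below 1, 4, 8, 31), and build the result dict once from the differences of those cumulative counts.
import Mathlib
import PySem

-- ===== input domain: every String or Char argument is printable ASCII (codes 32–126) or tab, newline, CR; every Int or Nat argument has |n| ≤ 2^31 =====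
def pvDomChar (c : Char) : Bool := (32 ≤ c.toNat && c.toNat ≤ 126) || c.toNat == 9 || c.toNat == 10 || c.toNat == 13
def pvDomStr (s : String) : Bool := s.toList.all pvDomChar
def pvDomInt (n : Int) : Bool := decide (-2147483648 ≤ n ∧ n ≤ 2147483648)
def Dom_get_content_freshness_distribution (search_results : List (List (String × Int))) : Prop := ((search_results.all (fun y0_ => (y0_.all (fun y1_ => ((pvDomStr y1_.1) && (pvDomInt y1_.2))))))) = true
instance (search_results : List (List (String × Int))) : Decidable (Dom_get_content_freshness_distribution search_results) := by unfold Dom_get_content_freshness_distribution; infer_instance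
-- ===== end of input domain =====

-- B replaces A's single-pass five-way if/elif classification into a mutated dict by staged
-- passes: extract the ages once, take four cumulative counts (< 1, < 4, < 8, < 31), and
-- build the result dict once from their differences (alternative decomposition, same cost).

-- ===== PORT A =====
def get_content_freshness_distribution (search_results : List (List (String × Int))) : List (String × Int) :=
  let age_ranges : PySem.Dict String Int :=
    PySem.Dict.mk [("very_recent", 0), ("recent", 0), ("this_week", 0), ("this_month", 0), ("older", 0)]
  (search_results.foldl (fun d result =>
    let age_days := (PySem.Dict.mk result).getD "age_days" 0
    if age_days < 1 then d.modify "very_recent" 0 (· + 1)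
    else if age_days < 4 then d.modify "recent" 0 (· + 1)
    else if age_days < 8 then d.modify "this_week" 0 (· + 1)
    else if age_days < 31 then d.modify "this_month" 0 (· + 1)
    else d.modify "older" 0 (· + 1)) age_ranges).items

-- ===== PORT B =====
-- helper for B: `sum(1 for a in ages if a < t)`
def gcfd_cntLt (t : Int) (ages : List Int) : Int :=
  ((ages.filter (fun a => a < t)).length : Int)

def get_content_freshness_distribution_alt (search_results : List (List (String × Int))) : List (String × Int) :=
  let ages : List Int := search_results.map (fun r => (PySem.Dict.mk r).getD "age_days" 0)
  let c1 := gcfd_cntLt 1 ages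
  let c4 := gcfd_cntLt 4 ages
  let c8 := gcfd_cntLt 8 ages
  let c31 := gcfd_cntLt 31 ages
  [("very_recent", c1), ("recent", c4 - c1), ("this_week", c8 - c4),
   ("this_month", c31 - c8), ("older", (ages.length : Int) - c31)]

-- ===== PRECONDITION & SPEC =====
def Spec_get_content_freshness_distribution (search_results : List (List (String × Int))) (out : List (String × Int)) : Prop := out = get_content_freshness_distribution_alt search_results
instance (search_results : List (List (String × Int))) (out : List (String × Int)) : Decidable (Spec_get_content_freshness_distribution search_results out) := by unfold Spec_get_content_freshness_distribution; infer_instance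

-- ===== CLAIM (what is proved, stated in full; the proofs are below) =====
def Claim_equal_get_content_freshness_distribution : Prop := ∀ (search_results : List (List (String × Int))), Dom_get_content_freshness_distribution search_results → Spec_get_content_freshness_distribution search_results (get_content_freshness_distribution search_results)

-- ===== LEMMAS AND PROOFS =====

lemma gcfd_cntLt_cons (t x : Int) (l : List Int) :
    gcfd_cntLt t (x :: l) = gcfd_cntLt t l + (if x < t then 1 else 0) := by
  by_cases h : x < t <;> simp [gcfd_cntLt, h]

lemma gcfd_loop_inv (rs : List (List (String × Int))) :
    ∀ (a b c d e : Int),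
      (rs.foldl (fun d result =>
          let age_days := (PySem.Dict.mk result).getD "age_days" 0
          if age_days < 1 then d.modify "very_recent" 0 (· + 1)
          else if age_days < 4 then d.modify "recent" 0 (· + 1)
          else if age_days < 8 then d.modify "this_week" 0 (· + 1)
          else if age_days < 31 then d.modify "this_month" 0 (· + 1)
          else d.modify "older" 0 (· + 1))
        (PySem.Dict.mk [("very_recent", a), ("recent", b), ("this_week", c), ("this_month", d), ("older", e)])).items
      = (let ages := rs.map (fun r => (PySem.Dict.mk r).getD "age_days" 0)
         [("very_recent", a + gcfd_cntLt 1 ages),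
          ("recent", b + (gcfd_cntLt 4 ages - gcfd_cntLt 1 ages)),
          ("this_week", c + (gcfd_cntLt 8 ages - gcfd_cntLt 4 ages)),
          ("this_month", d + (gcfd_cntLt 31 ages - gcfd_cntLt 8 ages)),
          ("older", e + ((ages.length : Int) - gcfd_cntLt 31 ages))]) := by
  induction rs with
  | nil =>
    intro a b c d e
    simp [gcfd_cntLt]
  | cons hd tl ih =>
    intro a b c d e
    simp only [List.foldl_cons, List.map_cons, gcfd_cntLt_cons, List.length_cons]
    set age := (PySem.Dict.mk hd).getD "age_days" 0 with hage
    by_cases h1 : age < 1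
    · rw [if_pos h1]
      rw [show (PySem.Dict.mk [("very_recent", a), ("recent", b), ("this_week", c), ("this_month", d), ("older", e)]).modify "very_recent" 0 (· + 1)
          = PySem.Dict.mk [("very_recent", a + 1), ("recent", b), ("this_week", c), ("this_month", d), ("older", e)] from rfl]
      rw [ih (a + 1) b c d e]
      simp only [List.cons.injEq, Prod.mk.injEq, true_and, and_true,
        if_pos h1, if_pos (show age < 4 by omega), if_pos (show age < 8 by omega), if_pos (show age < 31 by omega)]
      push_cast
      omega
    · by_cases h2 : age < 4
      · rw [if_neg h1, if_pos h2]
        rw [show (PySem.Dict.mk [("very_recent", a), ("recent", b), ("this_week", c), ("this_month", d), ("older", e)]).modify "recent" 0 (· + 1)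
            = PySem.Dict.mk [("very_recent", a), ("recent", b + 1), ("this_week", c), ("this_month", d), ("older", e)] from rfl]
        rw [ih a (b + 1) c d e]
        simp only [List.cons.injEq, Prod.mk.injEq, true_and, and_true,
          if_neg h1, if_pos h2, if_pos (show age < 8 by omega), if_pos (show age < 31 by omega)]
        push_cast
        omega
      · by_cases h3 : age < 8
        · rw [if_neg h1, if_neg h2, if_pos h3]
          rw [show (PySem.Dict.mk [("very_recent", a), ("recent", b), ("this_week", c), ("this_month", d), ("older", e)]).modify "this_week" 0 (· + 1)
              = PySem.Dict.mk [("very_recent", a), ("recent", b), ("this_week", c + 1), ("this_month", d), ("older", e)] from rfl]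
          rw [ih a b (c + 1) d e]
          simp only [List.cons.injEq, Prod.mk.injEq, true_and, and_true,
            if_neg h1, if_neg h2, if_pos h3, if_pos (show age < 31 by omega)]
          push_cast
          omega
        · by_cases h4 : age < 31
          · rw [if_neg h1, if_neg h2, if_neg h3, if_pos h4]
            rw [show (PySem.Dict.mk [("very_recent", a), ("recent", b), ("this_week", c), ("this_month", d), ("older", e)]).modify "this_month" 0 (· + 1)
                = PySem.Dict.mk [("very_recent", a), ("recent", b), ("this_week", c), ("this_month", d + 1), ("older", e)] from rfl]
            rw [ih a b c (d + 1) e]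
            simp only [List.cons.injEq, Prod.mk.injEq, true_and, and_true,
              if_neg h1, if_neg h2, if_neg h3, if_pos h4]
            push_cast
            omega
          · rw [if_neg h1, if_neg h2, if_neg h3, if_neg h4]
            rw [show (PySem.Dict.mk [("very_recent", a), ("recent", b), ("this_week", c), ("this_month", d), ("older", e)]).modify "older" 0 (· + 1)
                = PySem.Dict.mk [("very_recent", a), ("recent", b), ("this_week", c), ("this_month", d), ("older", e + 1)] from rfl]
            rw [ih a b c d (e + 1)]
            simp only [List.cons.injEq, Prod.mk.injEq, true_and, and_true,
              if_neg h1, if_neg h2, if_neg h3, if_neg h4]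
            push_cast
            omega

-- ===== VERDICT (by name: the statement is the Claim_ definition above) =====
theorem get_content_freshness_distribution_spec : Claim_equal_get_content_freshness_distribution := by
  intro rs _
  unfold Spec_get_content_freshness_distribution get_content_freshness_distribution get_content_freshness_distribution_alt
  rw [gcfd_loop_inv rs 0 0 0 0 0]
  simp
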